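-- pv_equiv track=rewrite | github.com/ekolenchuk/Ft_220008_Kolenchuk_8 | Ft_220008_Kolenchuk_8/main.py | queue_taxi
-- ===== SOURCE A (Python) =====
-- def queue_taxi(indexes_of_km, indexes_of_rub):
--     count = len(indexes_of_rub)
--     result_indexes = []
--     for i in range(count):
--         for index in indexes_of_km:
--             if index == i + 1:
--                 result_indexes.append(indexes_of_rub[indexes_of_km.index(index)])
--     return result_indexes
-- ===== SOURCE B (Python) =====
-- def queue_taxi(indexes_of_km, indexes_of_rub):
--     # value -> (first position in indexes_of_km, number of occurrences), one pass
--     info = {}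
--     for pos, v in enumerate(indexes_of_km):
--         if v in info:
--             first, cnt = info[v]
--             info[v] = (first, cnt + 1)
--         else:
--             info[v] = (pos, 1)
--     result = []
--     for i in range(1, len(indexes_of_rub) + 1):
--         if i in info:
--             first, cnt = info[i]
--             result.extend([indexes_of_rub[first]] * cnt)
--     return result
-- ===== Notes on version B (the rewrite author's own statement) =====
-- stated objective: faster
-- what changed: Replaces the nested scan (for each position, scan km and re-run km.index) by one pass over km building a dict value->(first index, count) and then a single pass over positions.
import Mathlib
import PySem

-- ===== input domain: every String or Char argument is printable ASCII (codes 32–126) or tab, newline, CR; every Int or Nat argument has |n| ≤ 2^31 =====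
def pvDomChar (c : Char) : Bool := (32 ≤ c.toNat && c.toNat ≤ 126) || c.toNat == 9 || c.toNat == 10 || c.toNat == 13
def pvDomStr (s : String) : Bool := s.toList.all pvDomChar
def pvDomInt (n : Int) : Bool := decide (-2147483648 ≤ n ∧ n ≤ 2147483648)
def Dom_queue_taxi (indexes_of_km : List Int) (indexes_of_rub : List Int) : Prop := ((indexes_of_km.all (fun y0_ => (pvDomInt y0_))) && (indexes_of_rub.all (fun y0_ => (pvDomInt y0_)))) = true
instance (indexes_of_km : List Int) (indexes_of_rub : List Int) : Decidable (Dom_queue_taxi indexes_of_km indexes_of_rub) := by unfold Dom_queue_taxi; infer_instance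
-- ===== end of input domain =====

-- B replaces A's nested scans (for each position, scan km and re-run km.index) by one pass over km
-- building a dict value -> (first index, count) plus a single pass over positions.

-- ===== PORT A =====
-- literal transliteration of A; rub[km.index(index)] is pyGetD because Pre_ below excludes exactly
-- the inputs where that indexing raises IndexError (Python's `count` local is inlined)
def queue_taxi (indexes_of_km : List Int) (indexes_of_rub : List Int) : List Int :=
  (PySem.List.pyRange 0 (indexes_of_rub.length : Int) 1).foldl (fun result_indexes i =>
    indexes_of_km.foldl (fun res index =>
      if index = i + 1 then
        res ++ [PySem.List.pyGetD indexes_of_rub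
          (((PySem.List.index? indexes_of_km index).getD 0 : Nat) : Int) 0]
      else res) result_indexes) []

-- ===== PORT B =====
-- one pass over enumerate(km): value -> (first position, number of occurrences)
def qtStep (d : PySem.Dict Int (Int × Int)) (p : Int × Int) : PySem.Dict Int (Int × Int) :=
  if d.contains p.2 then
    d.insert p.2 ((d.getD p.2 (0, 0)).1, (d.getD p.2 (0, 0)).2 + 1)
  else d.insert p.2 (p.1, 1)

def qtInfo (indexes_of_km : List Int) : PySem.Dict Int (Int × Int) :=
  (PySem.List.enumerate indexes_of_km 0).foldl qtStep PySem.Dict.empty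

def queue_taxi_alt (indexes_of_km : List Int) (indexes_of_rub : List Int) : List Int :=
  (PySem.List.pyRange 1 ((indexes_of_rub.length : Int) + 1) 1).foldl (fun result i =>
    if (qtInfo indexes_of_km).contains i then
      result ++ List.replicate ((qtInfo indexes_of_km).getD i (0, 0)).2.toNat
        (PySem.List.pyGetD indexes_of_rub ((qtInfo indexes_of_km).getD i (0, 0)).1 0)
    else result) []

-- ===== PRECONDITION & SPEC =====
-- Pre_ excludes exactly the inputs on which the Python A raises IndexError: some position value
-- i+1 first occurs in indexes_of_km at an index ≥ len(indexes_of_rub) (my B raises there too).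
def Pre_queue_taxi (indexes_of_km : List Int) (indexes_of_rub : List Int) : Prop :=
  ∀ i ∈ List.range indexes_of_rub.length,
    ((PySem.List.index? indexes_of_km ((i : Int) + 1)).all
      (fun j => decide (j < indexes_of_rub.length))) = true
instance (indexes_of_km : List Int) (indexes_of_rub : List Int) : Decidable (Pre_queue_taxi indexes_of_km indexes_of_rub) := by unfold Pre_queue_taxi; infer_instance
def pvWitness_queue_taxi : List Int × List Int := ([3, 1, 2, 2], [10, 20, 30])

def Spec_queue_taxi (indexes_of_km : List Int) (indexes_of_rub : List Int) (out : List Int) : Prop := out = queue_taxi_alt indexes_of_km indexes_of_rub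
instance (indexes_of_km : List Int) (indexes_of_rub : List Int) (out : List Int) : Decidable (Spec_queue_taxi indexes_of_km indexes_of_rub out) := by unfold Spec_queue_taxi; infer_instance

-- ===== CLAIM (what is proved, stated in full; the proofs are below) =====
def Claim_equal_queue_taxi : Prop := ∀ (indexes_of_km : List Int) (indexes_of_rub : List Int), Dom_queue_taxi indexes_of_km indexes_of_rub → Pre_queue_taxi indexes_of_km indexes_of_rub → Spec_queue_taxi indexes_of_km indexes_of_rub (queue_taxi indexes_of_km indexes_of_rub)

-- ===== LEMMAS AND PROOFS =====

-- an append-if fold over l appends the constant c once per occurrence of t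
lemma qt_foldl_if_count (l : List Int) (t c : Int) :
    ∀ res : List Int,
      l.foldl (fun r x => if x = t then r ++ [c] else r) res
        = res ++ List.replicate (l.count t) c := by
  induction l with
  | nil => intro res; simp
  | cons x l ih =>
    intro res
    by_cases h : x = t
    · rw [List.foldl_cons, if_pos h, ih, h, List.count_cons_self]
      simp [List.replicate_succ, List.append_assoc]
    · rw [List.foldl_cons, if_neg h, ih]
      simp [List.count_cons]
      exact h

-- A's result as a fold of replicate blocks over positions
lemma queue_taxi_eq (km rub : List Int) :
    queue_taxi km rub
      = (PySem.List.pyRange 0 (rub.length : Int) 1).foldl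
          (fun res i => res ++ List.replicate (km.count (i + 1))
            (PySem.List.pyGetD rub (((PySem.List.index? km (i + 1)).getD 0 : Nat) : Int) 0)) [] := by
  unfold queue_taxi
  refine List.foldl_ext _ _ _ ?_
  intro res i _
  have hb : (fun (r : List Int) (index : Int) =>
      if index = i + 1 then
        r ++ [PySem.List.pyGetD rub (((PySem.List.index? km index).getD 0 : Nat) : Int) 0]
      else r)
    = (fun (r : List Int) (x : Int) =>
        if x = i + 1 then
          r ++ [PySem.List.pyGetD rub (((PySem.List.index? km (i + 1)).getD 0 : Nat) : Int) 0]
        else r) := by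
    funext r x
    by_cases h : x = i + 1
    · simp [h]
    · simp [h]
  rw [hb, qt_foldl_if_count]

lemma qt_index?_append (l : List Int) (x v : Int) (hv : v ≠ x) :
    PySem.List.index? (l ++ [x]) v = PySem.List.index? l v := by
  by_cases hm : v ∈ l
  · exact PySem.List.index?_append_of_mem (t := [x]) hm
  · have h1 : PySem.List.index? l v = none := (PySem.List.index?_eq_none_iff _ _).mpr hm
    have h2 : PySem.List.index? (l ++ [x]) v = none := by
      apply (PySem.List.index?_eq_none_iff _ _).mpr
      intro hmem
      rcases List.mem_append.mp hmem with h' | h'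
      · exact hm h'
      · exact hv (List.mem_singleton.mp h')
    rw [h1, h2]

lemma qt_count_append (l : List Int) (x v : Int) (hv : v ≠ x) :
    (l ++ [x]).count v = l.count v := by
  have hvx : ¬ x = v := fun h => hv h.symm
  simp [List.count_append, hvx]

-- the dict built by B's first pass: value -> (first index in km, count in km)
lemma qtInfo_get? (km : List Int) : ∀ v : Int,
    (qtInfo km).get? v
      = (PySem.List.index? km v).map (fun (j : Nat) => ((j : Int), (km.count v : Int))) := by
  induction km using List.reverseRecOn with
  | nil =>
    intro v
    simp [qtInfo, PySem.List.enumerate_nil, PySem.Dict.get?_empty]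
  | append_singleton l x ih =>
    intro v
    have hstep : qtInfo (l ++ [x]) = qtStep (qtInfo l) ((l.length : Int), x) := by
      simp [qtInfo, PySem.List.enumerate_append, PySem.List.enumerate_cons,
        PySem.List.enumerate_nil, List.foldl_append]
    by_cases hx : x ∈ l
    · obtain ⟨j, hj⟩ := Option.isSome_iff_exists.mp ((PySem.List.index?_isSome_iff _ _).mpr hx)
      have hgetx : (qtInfo l).get? x = some ((j : Int), (l.count x : Int)) := by
        rw [ih x, hj]; rfl
      have hcont : (qtInfo l).contains x = true := by
        rw [PySem.Dict.contains_eq_isSome_get?, hgetx]; rfl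
      have hgetD : (qtInfo l).getD x (0, 0) = ((j : Int), (l.count x : Int)) := by
        rw [PySem.Dict.getD_eq_get?_getD, hgetx]; rfl
      have hres : qtStep (qtInfo l) ((l.length : Int), x)
          = (qtInfo l).insert x ((j : Int), (l.count x : Int) + 1) := by
        unfold qtStep; simp [hcont, hgetD]
      by_cases hv : v = x
      · subst hv
        have hidx : PySem.List.index? (l ++ [v]) v = some j := by
          rw [PySem.List.index?_append_of_mem (t := [v]) hx]; exact hj
        have hcnt : (l ++ [v]).count v = l.count v + 1 := by
          simp [List.count_append]
        rw [hstep, hres, PySem.Dict.get?_insert_self]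
        simp only [hidx, hcnt, Option.map_some]
        norm_cast
      · have hidx := qt_index?_append l x v hv
        have hcnt := qt_count_append l x v hv
        rw [hstep, hres, PySem.Dict.get?_insert_of_ne _ _ hv, ih v]
        simp only [hidx, hcnt]
    · have hnone : PySem.List.index? l x = none := (PySem.List.index?_eq_none_iff _ _).mpr hx
      have hgetx : (qtInfo l).get? x = none := by rw [ih x, hnone]; rfl
      have hcont : (qtInfo l).contains x = false := by
        rw [PySem.Dict.contains_eq_isSome_get?, hgetx]; rfl
      have hres : qtStep (qtInfo l) ((l.length : Int), x)
          = (qtInfo l).insert x ((l.length : Int), 1) := by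
        unfold qtStep; simp [hcont]
      by_cases hv : v = x
      · subst hv
        have hidx : PySem.List.index? (l ++ [v]) v = some l.length :=
          PySem.List.index?_append_singleton_self l v hx
        have hc0 : l.count v = 0 := List.count_eq_zero.mpr hx
        have hcnt : (l ++ [v]).count v = 1 := by
          simp [List.count_append, hc0]
        rw [hstep, hres, PySem.Dict.get?_insert_self]
        simp only [hidx, hcnt, Option.map_some]
        norm_cast
      · have hidx := qt_index?_append l x v hv
        have hcnt := qt_count_append l x v hv
        rw [hstep, hres, PySem.Dict.get?_insert_of_ne _ _ hv, ih v]
        simp only [hidx, hcnt]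

-- B's result as the same fold of replicate blocks
lemma queue_taxi_alt_eq (km rub : List Int) :
    queue_taxi_alt km rub
      = (PySem.List.pyRange 1 ((rub.length : Int) + 1) 1).foldl
          (fun res i => res ++ List.replicate (km.count i)
            (PySem.List.pyGetD rub (((PySem.List.index? km i).getD 0 : Nat) : Int) 0)) [] := by
  unfold queue_taxi_alt
  refine List.foldl_ext _ _ _ ?_
  intro res i _
  by_cases h : ∃ j, PySem.List.index? km i = some j
  · obtain ⟨j, hj⟩ := h
    have hget : (qtInfo km).get? i = some ((j : Int), (km.count i : Int)) := by
      rw [qtInfo_get? km i, hj]; rfl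
    have hcont : (qtInfo km).contains i = true := by
      rw [PySem.Dict.contains_eq_isSome_get?, hget]; rfl
    have hgetD : (qtInfo km).getD i (0, 0) = ((j : Int), (km.count i : Int)) := by
      rw [PySem.Dict.getD_eq_get?_getD, hget]; rfl
    have h1 : ((qtInfo km).getD i (0, 0)).1 = ((j : Int)) := by rw [hgetD]
    have h2 : ((qtInfo km).getD i (0, 0)).2.toNat = km.count i := by
      rw [hgetD]; exact Int.toNat_natCast _
    simp only [hcont, if_true, h1, h2, hj, Option.getD_some]
  · have hnone : PySem.List.index? km i = none := by
      cases hx : PySem.List.index? km i with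
      | none => rfl
      | some j => exact absurd ⟨j, hx⟩ h
    have hnm : i ∉ km := (PySem.List.index?_eq_none_iff _ _).mp hnone
    have hget : (qtInfo km).get? i = none := by rw [qtInfo_get? km i, hnone]; rfl
    have hcont : (qtInfo km).contains i = false := by
      rw [PySem.Dict.contains_eq_isSome_get?, hget]; rfl
    have hcnt : km.count i = 0 := List.count_eq_zero.mpr hnm
    simp [hcont, hcnt]

-- ===== VERDICT (by name: the statement is the Claim_ definition above) =====
theorem queue_taxi_spec : Claim_equal_queue_taxi := by
  intro km rub _ _
  unfold Spec_queue_taxi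
  rw [queue_taxi_eq, queue_taxi_alt_eq]
  rw [PySem.List.pyRange_one, PySem.List.pyRange_one]
  simp only [sub_zero, add_sub_cancel_right, Int.toNat_natCast, List.foldl_map]
  refine List.foldl_ext _ _ _ ?_
  intro res k _
  have e : (0 : Int) + (k : Int) + 1 = 1 + (k : Int) := by ring
  rw [e]
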